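-- pv_equiv track=rewrite | github.com/fish-404/CodePractice | CodeChef/Easy/Stupid Machine/Stupid Machine.py | countOnce
-- ===== SOURCE A (Python) =====
-- def countOnce(nums):
--     minNum = min(nums)
--     minOrder = nums.index(minNum)
--     nums = [x - minNum for x in nums]
--     if nums[0] == 0: # recursion end
--         return minNum * len(nums)
--     else:
--         return minNum * len(nums) + countOnce(nums[:minOrder])
-- ===== SOURCE B (Python) =====
-- def countOnce(nums):
--     # One forward pass over the strict prefix-minima chain; telescoping sum
--     # replaces A's recursion on ever-shorter shifted prefixes.
--     total = 0
--     cur = nums[0]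
--     for i, x in enumerate(nums):
--         if x < cur:
--             total += (cur - x) * i
--             cur = x
--     return total + cur * len(nums)
-- ===== Notes on version B (the rewrite author's own statement) =====
-- stated objective: faster
-- what changed: Replaced A's O(n^2) recursion on shifted prefixes (min/index/list-copy per level) with a single forward pass over the strict prefix-minima chain using a telescoping sum.
-- outside the precondition, e.g. on countOnce([]): A raises ValueError, B raises IndexError
import Mathlib
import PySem

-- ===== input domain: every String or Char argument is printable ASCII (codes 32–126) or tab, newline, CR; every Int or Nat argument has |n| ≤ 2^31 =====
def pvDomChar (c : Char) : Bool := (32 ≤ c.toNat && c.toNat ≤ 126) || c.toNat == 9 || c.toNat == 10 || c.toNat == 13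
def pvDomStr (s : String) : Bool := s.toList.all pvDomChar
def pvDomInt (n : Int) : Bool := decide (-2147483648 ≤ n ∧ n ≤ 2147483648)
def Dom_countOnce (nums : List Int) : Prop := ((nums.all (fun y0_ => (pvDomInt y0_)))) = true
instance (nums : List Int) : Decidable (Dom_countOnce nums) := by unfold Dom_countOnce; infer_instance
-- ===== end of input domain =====

-- B replaces A's O(n^2) recursion on shifted prefixes by one forward pass (telescoping sum); faster in a timing run.

-- ===== PORT A =====
def countOnce (nums : List Int) : Int :=
  match PySem.List.min? nums (fun y => y) with
  | none => 0  -- min([]) raises ValueError; excluded by Pre_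
  | some minNum =>
    match hp : PySem.List.index? nums minNum with
    | none => 0  -- unreachable: the minimum is a member
    | some minOrder =>
      let nums' := nums.map (fun x => x - minNum)
      if PySem.List.pyGet? nums' 0 = some 0 then
        minNum * (nums'.length : Int)
      else
        minNum * (nums'.length : Int) + countOnce (PySem.List.slice nums' none (some (minOrder : Int)))
termination_by nums.length
decreasing_by
  rw [PySem.List.slice_to_natCast]
  obtain ⟨hk, -, -⟩ := PySem.List.getElem_of_index?_eq_some hp
  simp only [List.length_take, List.length_map]
  omega

-- ===== PORT B =====
def pvStep (st : Int × Int) (p : Int × Int) : Int × Int :=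
  if p.2 < st.2 then (st.1 + (st.2 - p.2) * p.1, p.2) else st

def countOnce_alt (nums : List Int) : Int :=
  match nums with
  | [] => 0  -- nums[0] raises IndexError; excluded by Pre_
  | x0 :: _ =>
    let st := (PySem.List.enumerate nums 0).foldl pvStep (0, x0)
    st.1 + st.2 * (nums.length : Int)

-- ===== PRECONDITION & SPEC =====
-- Python's min([]) raises ValueError, so A raises on the empty list (and so does B, at nums[0]).
def Pre_countOnce (nums : List Int) : Prop := nums ≠ []
instance (nums : List Int) : Decidable (Pre_countOnce nums) := by unfold Pre_countOnce; infer_instance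
def pvWitness_countOnce : List Int := [3, 1, 2]

def Spec_countOnce (nums : List Int) (out : Int) : Prop := out = countOnce_alt nums
instance (nums : List Int) (out : Int) : Decidable (Spec_countOnce nums out) := by unfold Spec_countOnce; infer_instance

-- ===== CLAIM (what is proved, stated in full; the proofs are below) =====
def Claim_equal_countOnce : Prop := ∀ (nums : List Int), Dom_countOnce nums → Pre_countOnce nums → Spec_countOnce nums (countOnce nums)

-- ===== LEMMAS AND PROOFS =====

-- Folding pvStep over pairs whose second components are all ≥ the current minimum changes nothing.
lemma pvStep_const (l : List (Int × Int)) (t c : Int) (h : ∀ p ∈ l, c ≤ p.2) :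
    l.foldl pvStep (t, c) = (t, c) := by
  induction l with
  | nil => rfl
  | cons p l ih =>
    simp only [List.foldl_cons, pvStep]
    rw [if_neg (not_lt.2 (h p (List.mem_cons_self)))]
    exact ih (fun q hq => h q (List.mem_cons_of_mem _ hq))

-- The current-minimum component after the fold is the initial one or one of the scanned values.
lemma pvStep_cur_mem (l : List (Int × Int)) (t c : Int) :
    (l.foldl pvStep (t, c)).2 = c ∨ (l.foldl pvStep (t, c)).2 ∈ l.map (·.2) := by
  induction l generalizing t c with
  | nil => exact Or.inl rfl
  | cons p l ih =>
    simp only [List.foldl_cons, pvStep, List.map_cons, List.mem_cons]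
    by_cases h : p.2 < c
    · rw [if_pos h]
      rcases ih (t + (c - p.2) * p.1) p.2 with h' | h'
      · exact Or.inr (Or.inl h')
      · exact Or.inr (Or.inr h')
    · rw [if_neg h]
      rcases ih t c with h' | h'
      · exact Or.inl h'
      · exact Or.inr (Or.inr h')

lemma index?_map_sub (xs : List Int) (c m : Int) :
    PySem.List.index? (xs.map (fun x => x - c)) (m - c) = PySem.List.index? xs m := by
  induction xs with
  | nil => rfl
  | cons x t ih =>
    by_cases h : x = m
    · subst h
      rw [List.map_cons, PySem.List.index?_cons_self, PySem.List.index?_cons_self]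
    · have hne2 : x - c ≠ m - c := fun hc => h (by linarith)
      rw [List.map_cons, PySem.List.index?_cons_of_ne _ hne2, PySem.List.index?_cons_of_ne _ h, ih]

lemma foldl_min_sub (c : Int) : ∀ (t : List Int) (x : Int),
    (t.map (fun y => y - c)).foldl min (x - c) = t.foldl min x - c := by
  intro t
  induction t with
  | nil => intro x; rfl
  | cons y t ih =>
    intro x
    simp only [List.map_cons, List.foldl_cons]
    rw [min_sub_sub_right, ih]

lemma min?_map_sub (x : Int) (t : List Int) (c : Int) :
    PySem.List.min? ((x :: t).map (fun y => y - c)) (fun y => y) = some (t.foldl min x - c) := by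
  rw [List.map_cons, PySem.List.min?_id_cons, foldl_min_sub]

-- One-step evaluation of A's port given the min and its leftmost index.
lemma countOnce_eq (nums : List Int) (m : Int) (p : Nat)
    (hm : PySem.List.min? nums (fun y => y) = some m)
    (hp : PySem.List.index? nums m = some p) :
    countOnce nums =
      if PySem.List.pyGet? (nums.map (fun x => x - m)) 0 = some 0 then
        m * (nums.length : Int)
      else
        m * (nums.length : Int) +
          countOnce (PySem.List.slice (nums.map (fun x => x - m)) none (some (p : Int))) := by
  rw [countOnce.eq_def]
  split
  · next h => rw [hm] at h; cases h
  · next mN h =>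
    rw [hm] at h; injection h with h; subst h
    split
    · next h' => rw [hp] at h'; cases h'
    · next pN h' =>
      rw [hp] at h'; injection h' with h'; subst h'
      simp only [List.length_map]

-- Subtracting a constant from every element lowers A's value by c * length (one unfolding of each side).
lemma countOnce_shift (x : Int) (t : List Int) (c : Int) :
    countOnce ((x :: t).map (fun y => y - c)) = countOnce (x :: t) - c * ((x :: t).length : Int) := by
  have hm : PySem.List.min? (x :: t) (fun y => y) = some (t.foldl min x) :=
    PySem.List.min?_id_cons x t
  have hmem := PySem.List.min?_mem hm
  obtain ⟨p, hp⟩ := Option.isSome_iff_exists.1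
    ((PySem.List.index?_isSome_iff (x :: t) (t.foldl min x)).2 hmem)
  have hm' := min?_map_sub x t c
  have hp' : PySem.List.index? ((x :: t).map (fun y => y - c)) (t.foldl min x - c) = some p := by
    rw [index?_map_sub]; exact hp
  rw [countOnce_eq _ _ _ hm hp, countOnce_eq _ _ _ hm' hp']
  have hmap : ((x :: t).map (fun y => y - c)).map (fun y => y - (t.foldl min x - c)) =
      (x :: t).map (fun y => y - t.foldl min x) := by
    rw [List.map_map]; apply List.map_congr_left; intro a _; simp only [Function.comp_apply]; ring
  rw [hmap]
  simp only [List.length_map]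
  split_ifs with hg <;> ring

-- The guard of A at a cons cell reads the head of the shifted list.
lemma guard_iff (x m : Int) (t : List Int) :
    (PySem.List.pyGet? ((x :: t).map (fun y => y - m)) 0 = some 0) ↔ x = m := by
  simp [PySem.List.pyGet?, PySem.List.pyIdx?]
  omega

lemma countOnce_alt_cons (x0 : Int) (t : List Int) :
    countOnce_alt (x0 :: t) =
      ((PySem.List.enumerate (x0 :: t) 0).foldl pvStep (0, x0)).1 +
      ((PySem.List.enumerate (x0 :: t) 0).foldl pvStep (0, x0)).2 * ((x0 :: t).length : Int) := rfl

lemma main_equiv : ∀ (n : Nat) (nums : List Int), nums.length ≤ n → nums ≠ [] →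
    countOnce nums = countOnce_alt nums := by
  intro n
  induction n with
  | zero =>
    intro nums hlen hne
    cases nums with
    | nil => exact absurd rfl hne
    | cons x t => simp at hlen
  | succ n ih =>
    intro nums hlen hne
    obtain ⟨x0, t, rfl⟩ := List.exists_cons_of_ne_nil hne
    -- the minimum and its leftmost index
    have hm : PySem.List.min? (x0 :: t) (fun y => y) = some (t.foldl min x0) :=
      PySem.List.min?_id_cons x0 t
    set m := t.foldl min x0 with hmdef
    have hmem := PySem.List.min?_mem hm
    have hmle := PySem.List.min?_isMin hm
    obtain ⟨p, hp⟩ := Option.isSome_iff_exists.1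
      ((PySem.List.index?_isSome_iff (x0 :: t) m).2 hmem)
    obtain ⟨hk, hpm, hbefore⟩ := PySem.List.getElem_of_index?_eq_some hp
    rw [countOnce_eq _ _ _ hm hp, countOnce_alt_cons]
    by_cases hx0 : x0 = m
    · -- base case: the head is already the minimum; B's fold never fires
      rw [if_pos ((guard_iff x0 m t).2 hx0)]
      have hfold : (PySem.List.enumerate (x0 :: t) 0).foldl pvStep (0, x0) = (0, x0) := by
        apply pvStep_const
        intro q hq
        rw [PySem.List.mem_enumerate_iff] at hq
        obtain ⟨k, hklt, rfl⟩ := hq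
        exact le_of_eq_of_le hx0 (hmle _ (List.getElem_mem hklt))
      rw [hfold]
      rw [hx0]
      ring
    · -- recursive case: split B's fold at the leftmost-minimum index p
      rw [if_neg (fun hg => hx0 ((guard_iff x0 m t).1 hg))]
      have hp1 : 1 ≤ p := by
        rcases Nat.eq_zero_or_pos p with h0 | h1
        · exfalso; apply hx0; subst h0; simpa using hpm
        · exact h1
      obtain ⟨p', rfl⟩ : ∃ p', p = p' + 1 := ⟨p - 1, by omega⟩
      have hT : (x0 :: t).take (p' + 1) = x0 :: t.take p' := List.take_succ_cons
      have hlentake : ((x0 :: t).take (p' + 1)).length = p' + 1 := by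
        rw [List.length_take]; omega
      -- split the enumeration at index p'+1
      have hdecomp : PySem.List.enumerate (x0 :: t) 0 =
          PySem.List.enumerate ((x0 :: t).take (p' + 1)) 0 ++
          (((p' + 1 : Nat) : Int), m) ::
            PySem.List.enumerate ((x0 :: t).drop (p' + 1 + 1)) (((p' + 1 : Nat) : Int) + 1) := by
        conv_lhs => rw [← List.take_append_drop (p' + 1) (x0 :: t)]
        rw [PySem.List.enumerate_append, hlentake, List.drop_eq_getElem_cons hk, hpm,
          PySem.List.enumerate_cons]
        norm_num
      -- the state after the prefix of the fold
      have hcur : m <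
          ((PySem.List.enumerate ((x0 :: t).take (p' + 1)) 0).foldl pvStep (0, x0)).2 := by
        rcases pvStep_cur_mem (PySem.List.enumerate ((x0 :: t).take (p' + 1)) 0) 0 x0 with h | h
        · rw [h]
          exact lt_of_le_of_ne (hmle x0 (List.mem_cons_self)) (fun he => hx0 he.symm)
        · rw [PySem.List.map_snd_enumerate] at h
          obtain ⟨j, hj, hje⟩ := List.mem_iff_getElem.1 h
          rw [List.length_take] at hj
          have hj' : j < p' + 1 := lt_of_lt_of_le hj (min_le_left _ _)
          have hjlt : j < (x0 :: t).length := by omega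
          rw [List.getElem_take] at hje
          rw [← hje]
          exact lt_of_le_of_ne (hmle _ (List.getElem_mem hjlt)) (fun he => hbefore j hj' he.symm)
      set st1 := (PySem.List.enumerate ((x0 :: t).take (p' + 1)) 0).foldl pvStep (0, x0) with hst1
      -- evaluate the whole fold
      have hfold : (PySem.List.enumerate (x0 :: t) 0).foldl pvStep (0, x0) =
          (st1.1 + (st1.2 - m) * ((p' + 1 : Nat) : Int), m) := by
        rw [hdecomp, List.foldl_append, List.foldl_cons, ← hst1]
        have hstep : pvStep st1 (((p' + 1 : Nat) : Int), m) =
            (st1.1 + (st1.2 - m) * ((p' + 1 : Nat) : Int), m) := by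
          unfold pvStep
          rw [if_pos hcur]
        rw [hstep]
        apply pvStep_const
        intro q hq
        rw [PySem.List.mem_enumerate_iff] at hq
        obtain ⟨k, hklt, rfl⟩ := hq
        exact hmle _ (List.mem_of_mem_drop (List.getElem_mem hklt))
      rw [hfold]
      -- evaluate A's recursive call via slicing, the shift lemma, and the induction hypothesis
      rw [PySem.List.slice_to_natCast, ← List.map_take, hT, countOnce_shift]
      have hIH : countOnce (x0 :: t.take p') = countOnce_alt (x0 :: t.take p') := by
        apply ih
        · have : (x0 :: t.take p').length = p' + 1 := by rw [← hT, hlentake]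
          rw [this]
          simp only [List.length_cons] at hk hlen
          omega
        · exact List.cons_ne_nil _ _
      rw [hIH, countOnce_alt_cons]
      rw [← hT, ← hst1, hlentake] at *
      dsimp only
      ring
-- ===== VERDICT (by name: the statement is the Claim_ definition above) =====
theorem countOnce_spec : Claim_equal_countOnce := by
  intro nums _ hpre
  unfold Spec_countOnce
  exact main_equiv nums.length nums le_rfl hpre
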